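-- pv_equiv track=rewrite | github.com/mkhazaeidev/SayingWelcome | functional/beginner.py | welcome_recursive
-- ===== SOURCE A (Python) =====
-- from typing import Callable, Tuple, List, Dict, Any
--
-- def create_greeting(name: str) -> str:
--     """
--     Transforms a name into a formal greeting message.
--
--     This function represents the business logic transformation in our
--     pipeline. It focuses on a single responsibility: creating greetings.
--
--     Args:
--         name: Sanitized name ready for greeting creation.
--
--     Returns:
--         Formal greeting message incorporating the name.
--
--     Examples:
--         >>> create_greeting("Alice")
--         'Welcome, Alice!'
--     """
--     return f"Welcome, {name}!"
--
-- def is_valid_name(name: str) -> bool: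
--     """
--     Predicate function that validates name requirements.
--
--     In functional programming, predicate functions return boolean
--     values and are used with filtering operations. This function
--     defines the criteria for valid names in our system.
--
--     Args:
--         name: Name to validate against business rules.
--
--     Returns:
--         True if the name meets validation criteria, False otherwise.
--
--     Examples:
--         >>> is_valid_name("Alice")
--         True
--         >>> is_valid_name("A")  # Too short
--         False
--         >>> is_valid_name("   ")  # Only whitespace
--         False
--         >>> is_valid_name("")  # Empty string
--         False
--     """
--     cleaned_name = name.strip()
--     return bool(cleaned_name and len(cleaned_name) >= 2)
--
-- def welcome_recursive(names: List[str], results: List[str] = None) -> List[str]: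
--     """
--     Processes names recursively instead of using iterative loops.
--
--     Demonstrates recursion as the fundamental looping mechanism
--     in functional programming. This approach avoids mutable loop
--     variables and makes the termination condition explicit.
--
--     Args:
--         names: List of names to process. Modified through recursion.
--         results: Accumulator for results. Defaults to empty list.
--
--     Returns:
--         List of greeting messages for valid names.
--
--     Examples:
--         >>> welcome_recursive(["Alice", "Bob"])
--         ['Welcome, Alice!', 'Welcome, Bob!']
--         >>> welcome_recursive(["A", "Bob"])  # "A" is invalid
--         ['Welcome, Bob!']
--
--     Note:
--         This function uses tail recursion conceptually, though
--         Python doesn't optimize tail calls. In production with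
--         large lists, consider iterative approaches or languages
--         with proper tail call optimization.
--     """
--     # Initialize results accumulator on first call
--     if results is None:
--         results = []
--
--     # Base case: empty list, return accumulated results
--     if not names:
--         return results
--
--     # Recursive case: process first element, recurse on rest
--     first_name = names[0]
--     remaining_names = names[1:]
--
--     if is_valid_name(first_name):
--         # Create new list with added result (immutable update)
--         new_results = results + [create_greeting(first_name)]
--         return welcome_recursive(remaining_names, new_results)
--     else:
--         # Skip invalid name, continue with remaining
--         return welcome_recursive(remaining_names, results)
-- ===== SOURCE B (Python) =====
-- def create_greeting(name: str) -> str: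
--     return f"Welcome, {name}!"
--
-- def is_valid_name(name: str) -> bool:
--     cleaned_name = name.strip()
--     return bool(cleaned_name and len(cleaned_name) >= 2)
--
-- def welcome_recursive(names, results=None):
--     out = list(results) if results is not None else []
--     for name in names:
--         if is_valid_name(name):
--             out.append(create_greeting(name))
--     return out
-- ===== Notes on version B (the rewrite author's own statement) =====
-- stated objective: faster
-- what changed: Replaced the recursive accumulator-passing traversal (which rebuilds the results list with + on every valid name, O(n^2) copying) with a single iterative loop appending into one fresh output list.
import Mathlib
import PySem

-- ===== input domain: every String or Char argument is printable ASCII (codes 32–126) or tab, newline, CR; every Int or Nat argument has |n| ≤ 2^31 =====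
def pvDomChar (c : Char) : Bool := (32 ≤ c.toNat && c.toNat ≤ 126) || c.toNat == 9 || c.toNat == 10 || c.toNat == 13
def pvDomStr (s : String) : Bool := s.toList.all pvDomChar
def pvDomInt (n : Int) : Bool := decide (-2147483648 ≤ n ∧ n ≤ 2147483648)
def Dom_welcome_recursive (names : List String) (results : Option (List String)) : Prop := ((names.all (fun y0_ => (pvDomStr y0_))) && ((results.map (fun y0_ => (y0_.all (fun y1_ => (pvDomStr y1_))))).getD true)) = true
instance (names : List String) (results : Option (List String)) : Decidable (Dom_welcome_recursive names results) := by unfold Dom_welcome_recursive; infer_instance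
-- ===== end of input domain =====

-- B replaces the recursive accumulator-passing traversal with a single iterative loop (idiomatic).
-- ===== PORT A =====
def create_greeting (name : String) : String := "Welcome, " ++ name ++ "!"

def is_valid_name (name : String) : Bool :=
  let cleaned_name := PySem.Str.strip name
  -- bool(cleaned and len(cleaned) >= 2): falsy empty string gives False, else the comparison
  if cleaned_name = "" then false else decide (PySem.Str.len cleaned_name ≥ 2)

def welcome_recursive (names : List String) (results : Option (List String)) : List String :=
  let results := results.getD []
  match names with
  | [] => results
  | first_name :: remaining_names =>
    if is_valid_name first_name then
      welcome_recursive remaining_names (some (results ++ [create_greeting first_name]))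
    else
      welcome_recursive remaining_names (some results)

-- ===== PORT B =====
def welcome_recursive_alt (names : List String) (results : Option (List String)) : List String :=
  let out := match results with | some r => r | none => []
  names.foldl (fun out name => if is_valid_name name then out ++ [create_greeting name] else out) out

-- ===== PRECONDITION & SPEC =====
def Spec_welcome_recursive (names : List String) (results : Option (List String)) (out : List String) : Prop := out = welcome_recursive_alt names results
instance (names : List String) (results : Option (List String)) (out : List String) : Decidable (Spec_welcome_recursive names results out) := by unfold Spec_welcome_recursive; infer_instance

-- ===== CLAIM (what is proved, stated in full; the proofs are below) =====
def Claim_equal_welcome_recursive : Prop := ∀ (names : List String) (results : Option (List String)), Dom_welcome_recursive names results → Spec_welcome_recursive names results (welcome_recursive names results)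

-- ===== LEMMAS AND PROOFS =====
theorem welcome_recursive_eq_foldl (names : List String) (acc : List String) :
    welcome_recursive names (some acc) =
      names.foldl (fun out name => if is_valid_name name then out ++ [create_greeting name] else out) acc := by
  induction names generalizing acc with
  | nil => simp [welcome_recursive]
  | cons h t ih =>
    simp only [welcome_recursive, List.foldl, Option.getD]
    by_cases hv : is_valid_name h <;> simp [hv, ih]

-- ===== VERDICT (by name: the statement is the Claim_ definition above) =====
theorem welcome_recursive_spec : Claim_equal_welcome_recursive := by
  intro names results _
  unfold Spec_welcome_recursive welcome_recursive_alt
  cases results with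
  | none =>
    cases names with
    | nil => simp [welcome_recursive]
    | cons h t =>
      simp only [welcome_recursive, Option.getD, List.foldl]
      by_cases hv : is_valid_name h <;>
        simp [hv, welcome_recursive_eq_foldl]
  | some r => exact welcome_recursive_eq_foldl names r
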